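-- pv_equiv track=rewrite | github.com/larry1473/leetcode | pascalsTriangle.py | _helper
-- ===== SOURCE A (Python) =====
-- def _helper (arr):
--     new_arr = arr
--     res = [1,1]
--     index = 0
--     while index < len(arr):
--         if(index + 1 < len(arr)):
--             res.insert(1,arr[index] + arr[index + 1])
--         index += 1
--     return res
-- ===== SOURCE B (Python) =====
-- def _helper(arr):
--     sums = [x + y for x, y in zip(arr, arr[1:])]
--     return [1] + sums[::-1] + [1]
-- ===== Notes on version B (the rewrite author's own statement) =====
-- stated objective: faster
-- what changed: Replaces the while loop that repeatedly does O(n) res.insert(1, ...) with a single pass computing adjacent sums via zip, then reversing once and wrapping with 1s.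
import Mathlib
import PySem

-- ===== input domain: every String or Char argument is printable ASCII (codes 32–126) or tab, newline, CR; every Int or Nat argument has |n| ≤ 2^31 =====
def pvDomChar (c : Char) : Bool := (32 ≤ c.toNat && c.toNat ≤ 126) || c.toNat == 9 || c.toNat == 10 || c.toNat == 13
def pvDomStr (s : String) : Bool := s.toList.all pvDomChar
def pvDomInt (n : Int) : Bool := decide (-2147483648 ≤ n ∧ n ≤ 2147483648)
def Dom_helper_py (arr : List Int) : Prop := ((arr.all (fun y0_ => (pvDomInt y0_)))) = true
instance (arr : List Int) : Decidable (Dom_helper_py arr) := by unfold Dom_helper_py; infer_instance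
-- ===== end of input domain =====

-- B replaces A's quadratic while-loop (repeated res.insert(1, ...)) with one pass of
-- adjacent sums (zip), reversed once and wrapped with 1s; objective: faster.


-- ===== PORT A =====
-- the while loop of A, recursing on the index; arr[index] is in range whenever it is
-- read (index + 1 < len), so List.getD is exact there
def helper_py_loop (arr : List Int) (index : Nat) (res : List Int) : List Int :=
  if index < arr.length then
    helper_py_loop arr (index + 1)
      (if index + 1 < arr.length then
        PySem.List.insert res 1 (arr.getD index 0 + arr.getD (index + 1) 0)
      else res)
  else res
termination_by arr.length - index

def helper_py (arr : List Int) : List Int := helper_py_loop arr 0 [1, 1]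

-- ===== PORT B =====
def helper_py_alt (arr : List Int) : List Int :=
  let sums := (arr.zip arr.tail).map (fun p => p.1 + p.2)
  [1] ++ sums.reverse ++ [1]

-- ===== PRECONDITION & SPEC =====
def Spec_helper_py (arr : List Int) (out : List Int) : Prop := out = helper_py_alt arr
instance (arr : List Int) (out : List Int) : Decidable (Spec_helper_py arr out) := by unfold Spec_helper_py; infer_instance

-- ===== CLAIM (what is proved, stated in full; the proofs are below) =====
def Claim_equal_helper_py : Prop := ∀ (arr : List Int), Dom_helper_py arr → Spec_helper_py arr (helper_py arr)

-- ===== LEMMAS AND PROOFS =====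

theorem insert_one_cons (a v : Int) (rest : List Int) :
    PySem.List.insert (a :: rest) 1 v = a :: v :: rest := by
  have h : (1 : Nat) ≤ (a :: rest).length := by simp
  simpa using PySem.List.insert_natCast (a :: rest) 1 v h

-- adjacent-sum list
def adjSums (arr : List Int) : List Int := (arr.zip arr.tail).map (fun p => p.1 + p.2)

theorem adjSums_length (arr : List Int) : (adjSums arr).length = arr.length - 1 := by
  cases arr <;> simp [adjSums, List.length_zip] <;> omega

theorem adjSums_get (arr : List Int) (i : Nat) (h : i < (adjSums arr).length) :
    (adjSums arr)[i] = arr.getD i 0 + arr.getD (i + 1) 0 := by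
  have hl := adjSums_length arr
  have hi : i < arr.length := by omega
  have hi1 : i + 1 < arr.length := by omega
  have ht : i < arr.tail.length := by simp [List.length_tail]; omega
  simp [adjSums, List.getElem_zip, List.getD_eq_getElem?_getD,
    List.getElem?_eq_getElem hi, List.getElem?_eq_getElem hi1]

theorem loop_invariant (arr : List Int) (index : Nat) (acc : List Int) :
    helper_py_loop arr index (1 :: acc) =
      1 :: ((adjSums arr).drop index).reverse ++ acc := by
  by_cases h : index < arr.length
  · rw [helper_py_loop]
    simp only [if_pos h]
    by_cases h1 : index + 1 < arr.length
    · have hs : index < (adjSums arr).length := by have := adjSums_length arr; omega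
      rw [if_pos h1, insert_one_cons, loop_invariant arr (index + 1)]
      rw [List.drop_eq_getElem_cons hs, adjSums_get arr index hs]
      simp
    · have hs : (adjSums arr).length ≤ index := by have := adjSums_length arr; omega
      rw [if_neg h1, loop_invariant arr (index + 1)]
      rw [List.drop_eq_nil_of_le hs, List.drop_eq_nil_of_le (by omega)]
  · rw [helper_py_loop]
    have hs : (adjSums arr).length ≤ index := by have := adjSums_length arr; omega
    simp [h, List.drop_eq_nil_of_le hs]
termination_by arr.length - index

-- ===== VERDICT (by name: the statement is the Claim_ definition above) =====
theorem helper_py_spec : Claim_equal_helper_py := by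
  intro arr _
  show helper_py arr = helper_py_alt arr
  rw [helper_py, loop_invariant arr 0 [1]]
  simp [helper_py_alt, adjSums]
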